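-- pv_equiv track=rewrite | github.com/silnrsi/palaso-python | lib/palaso/collation/tailor.py | longestReplace
-- ===== SOURCE A (Python) =====
-- from functools import reduce
--
-- def longestReplace(s, d) :
--     i = reduce(lambda m, x: max(m, x if s[0:x] in d else 0), range(1, len(s)+1), 0)
--     if i > 0 :
--         for a in d[s[0:i]] :
--             if i < len(s) :
--                 for y in longestReplace(s[i:], d) :
--                     yield a + y
--             else :
--                 yield a
--     elif len(s) == 1 :
--         yield s
--     else :
--         for y in longestReplace(s[1:], d) :
--             yield s[0:1] + y
-- ===== SOURCE B (Python) =====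
-- def longestReplace(s, d):
--     # Bottom-up DP over suffixes: each suffix's expansion is computed exactly once
--     # (A re-runs the recursion for every alternative a), and the longest matching
--     # prefix is found by a descending scan with early break.
--     n = len(s)
--     res = [[""]]                      # res[m] = expansions of the suffix of length m
--     for j in range(n - 1, -1, -1):
--         L = n - j
--         best = 0
--         for k in range(L, 0, -1):
--             if s[j:j + k] in d:
--                 best = k
--                 break
--         if best > 0:
--             cur = [a + y for a in d[s[j:j + best]] for y in res[L - best]]
--         else:
--             cur = [s[j] + y for y in res[L - 1]]
--         res.append(cur)
--     return res[n]
-- ===== Notes on version B (the rewrite author's own statement) =====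
-- stated objective: alternative
-- what changed: Replaces A's generator recursion (which folds max over all ascending prefix lengths and re-runs the whole recursion once per alternative replacement) by a bottom-up DP over suffixes: each suffix's expansion list is computed exactly once and the longest dict-key prefix is found by a descending scan with early break.
-- crash fix: On the empty string A recurses on itself forever and raises RecursionError when the generator is consumed; B returns [''] (the empty product of replacements). — e.g. on longestReplace("", [("a", ["x"])]): A raises RecursionError, B returns [""]
import Mathlib
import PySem

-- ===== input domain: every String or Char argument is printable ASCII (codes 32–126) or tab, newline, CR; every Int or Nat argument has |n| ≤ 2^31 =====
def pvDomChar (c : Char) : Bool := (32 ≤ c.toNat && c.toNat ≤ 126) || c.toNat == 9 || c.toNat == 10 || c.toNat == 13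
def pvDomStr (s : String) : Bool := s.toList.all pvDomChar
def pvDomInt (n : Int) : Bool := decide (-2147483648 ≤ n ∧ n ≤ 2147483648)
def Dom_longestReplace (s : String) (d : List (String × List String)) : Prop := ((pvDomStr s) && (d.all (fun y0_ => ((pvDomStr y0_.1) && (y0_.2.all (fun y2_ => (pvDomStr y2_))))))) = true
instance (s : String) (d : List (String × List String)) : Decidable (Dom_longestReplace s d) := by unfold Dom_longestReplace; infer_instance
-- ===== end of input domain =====

-- B replaces A's per-alternative re-run of the recursion by a bottom-up DP over
-- suffixes (each suffix expanded once) with a descending early-break prefix scan;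
-- results are equal on every non-empty string. A is a generator: equivalence is
-- about the materialised sequence of yielded values.

-- first-match lookup among the dict's keys (Python dict lookup), key as char list
def pvLookup : List (String × List String) → List Char → Option (List String)
  | [], _ => none
  | (k, v) :: t, key => if k.toList = key then some v else pvLookup t key

-- Python 'key in d'
def pvKey (d : List (String × List String)) (key : List Char) : Bool :=
  (pvLookup d key).isSome

-- ===== PORT A =====
-- literal port of the generator on char lists; fuel = |s| makes the recursion total
-- (A diverges on the empty string; that input is outside Pre_ below)
def pvAgo (d : List (String × List String)) : Nat → List Char → List (List Char)
  | 0, _ => []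
  | fuel + 1, cs =>
    -- i = reduce(lambda m, x: max(m, x if s[0:x] in d else 0), range(1, len(s)+1), 0)
    let i := (List.range' 1 cs.length).foldl
      (fun m x => max m (if pvKey d (cs.take x) then x else 0)) 0
    if 0 < i then
      ((pvLookup d (cs.take i)).getD []).flatMap (fun a =>
        if i < cs.length then (pvAgo d fuel (cs.drop i)).map (fun y => a.toList ++ y)
        else [a.toList])
    else if cs.length = 1 then [cs]
    else (pvAgo d fuel (cs.drop 1)).map (fun y => cs.take 1 ++ y)

def longestReplace (s : String) (d : List (String × List String)) : List String :=
  (pvAgo d s.toList.length s.toList).map String.ofList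

-- ===== PORT B =====
-- best = first k in L,L-1,…,1 with s[j:j+k] in d, else 0 (descending scan, early break)
def pvFindBest (d : List (String × List String)) (cs : List Char) : Nat → Nat
  | 0 => 0
  | k + 1 => if pvKey d (cs.take (k + 1)) then k + 1 else pvFindBest d cs k

-- the DP loop over j = n-1 … 0: returns [res_L, res_{L-1}, …, res_0] for the
-- suffixes of cs (head = expansions of cs itself, last = [""] for the empty suffix)
def pvBgo (d : List (String × List String)) : List Char → List (List (List Char))
  | [] => [[[]]]
  | c :: rest =>
    let acc := pvBgo d rest
    let best := pvFindBest d (c :: rest) (rest.length + 1)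
    let cur :=
      if 0 < best then
        ((pvLookup d ((c :: rest).take best)).getD []).flatMap (fun a =>
          (acc.getD (best - 1) []).map (fun y => a.toList ++ y))
      else (acc.getD 0 []).map (fun y => c :: y)
    cur :: acc

def longestReplace_alt (s : String) (d : List (String × List String)) : List String :=
  ((pvBgo d s.toList).getD 0 []).map String.ofList

-- ===== PRECONDITION & SPEC =====
-- A recurses on itself forever on the empty string (RecursionError when consumed);
-- Pre_ excludes exactly that input.
def Pre_longestReplace (s : String) (d : List (String × List String)) : Prop := s ≠ ""
instance (s : String) (d : List (String × List String)) : Decidable (Pre_longestReplace s d) := by unfold Pre_longestReplace; infer_instance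
def pvWitness_longestReplace : String × (List (String × List String)) := ("abc", [("ab", ["X", "Y"]), ("c", ["Z"])])

-- On the empty string A raises RecursionError once the generator is consumed; B returns [""].
def Raises_longestReplace (s : String) (d : List (String × List String)) : Prop := s = ""
instance (s : String) (d : List (String × List String)) : Decidable (Raises_longestReplace s d) := by unfold Raises_longestReplace; infer_instance
def pvRaiseWitness_longestReplace : String × (List (String × List String)) := ("", [("a", ["x"])])
def pvRaiseWitnessOut_longestReplace : List String := [""]

def Spec_longestReplace (s : String) (d : List (String × List String)) (out : List String) : Prop := out = longestReplace_alt s d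
instance (s : String) (d : List (String × List String)) (out : List String) : Decidable (Spec_longestReplace s d out) := by unfold Spec_longestReplace; infer_instance

-- ===== CLAIM (what is proved, stated in full; the proofs are below) =====
def Claim_equal_longestReplace : Prop := ∀ (s : String) (d : List (String × List String)), Dom_longestReplace s d → Pre_longestReplace s d → Spec_longestReplace s d (longestReplace s d)
def Claim_raises_longestReplace : Prop := (∀ (s : String) (d : List (String × List String)), Dom_longestReplace s d → Raises_longestReplace s d → ¬ Pre_longestReplace s d) ∧ (Dom_longestReplace (pvRaiseWitness_longestReplace.1) (pvRaiseWitness_longestReplace.2) ∧ Raises_longestReplace (pvRaiseWitness_longestReplace.1) (pvRaiseWitness_longestReplace.2) ∧ longestReplace_alt (pvRaiseWitness_longestReplace.1) (pvRaiseWitness_longestReplace.2) = pvRaiseWitnessOut_longestReplace)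

-- ===== LEMMAS AND PROOFS =====

theorem pvFindBest_le (d : List (String × List String)) (cs : List Char) :
    ∀ k, pvFindBest d cs k ≤ k := by
  intro k
  induction k with
  | zero => simp [pvFindBest]
  | succ k ih => simp only [pvFindBest]; split <;> omega

-- A's ascending fold-max equals B's descending first-match scan
theorem pvFold_eq_findBest (d : List (String × List String)) (cs : List Char) :
    ∀ n, (List.range' 1 n).foldl
      (fun m x => max m (if pvKey d (cs.take x) then x else 0)) 0 = pvFindBest d cs n := by
  intro n
  induction n with
  | zero => simp [pvFindBest]
  | succ n ih =>
    rw [List.range'_1_concat, List.foldl_append, ih]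
    simp only [List.foldl_cons, List.foldl_nil, pvFindBest, Nat.add_comm 1 n]
    have h := pvFindBest_le d cs n
    split <;> omega

theorem pvBgo_cons (d : List (String × List String)) (c : Char) (rest : List Char) :
    pvBgo d (c :: rest) =
      (let acc := pvBgo d rest
       let best := pvFindBest d (c :: rest) (rest.length + 1)
       if 0 < best then
         ((pvLookup d ((c :: rest).take best)).getD []).flatMap (fun a =>
           (acc.getD (best - 1) []).map (fun y => a.toList ++ y))
       else (acc.getD 0 []).map (fun y => c :: y)) :: pvBgo d rest := rfl

-- indexing into the DP table is evaluating the DP at the dropped suffix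
theorem pvBgo_getD_drop (d : List (String × List String)) :
    ∀ (cs : List Char) (m : Nat), m ≤ cs.length →
      (pvBgo d cs).getD m [] = (pvBgo d (cs.drop m)).getD 0 [] := by
  intro cs
  induction cs with
  | nil => intro m hm; simp at hm; subst hm; simp
  | cons c rest ih =>
    intro m hm
    cases m with
    | zero => simp
    | succ m =>
      rw [pvBgo_cons]
      simp only [List.getD_cons_succ, List.drop_succ_cons]
      exact ih m (by simpa using hm)

-- main invariant: A's recursion equals the head of B's DP table on non-empty input
theorem pvAgo_eq_bgo (d : List (String × List String)) :
    ∀ (fuel : Nat) (cs : List Char), cs ≠ [] → cs.length ≤ fuel →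
      pvAgo d fuel cs = (pvBgo d cs).getD 0 [] := by
  intro fuel
  induction fuel with
  | zero =>
    intro cs hne hlen
    exact absurd (List.length_eq_zero_iff.mp (Nat.le_zero.mp hlen)) hne
  | succ fuel ih =>
    intro cs hne hlen
    obtain ⟨c, rest, rfl⟩ := List.exists_cons_of_ne_nil hne
    simp only [List.length_cons] at hlen
    rw [pvBgo_cons]
    simp only [List.getD_cons_zero]
    rw [show pvAgo d (fuel + 1) (c :: rest) =
      (let i := (List.range' 1 (c :: rest).length).foldl
        (fun m x => max m (if pvKey d ((c :: rest).take x) then x else 0)) 0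
       if 0 < i then
        ((pvLookup d ((c :: rest).take i)).getD []).flatMap (fun a =>
          if i < (c :: rest).length then (pvAgo d fuel ((c :: rest).drop i)).map (fun y => a.toList ++ y)
          else [a.toList])
       else if (c :: rest).length = 1 then [c :: rest]
       else (pvAgo d fuel ((c :: rest).drop 1)).map (fun y => (c :: rest).take 1 ++ y)) from rfl]
    simp only [List.length_cons]
    rw [pvFold_eq_findBest d (c :: rest) (rest.length + 1)]
    have hble := pvFindBest_le d (c :: rest) (rest.length + 1)
    generalize hbg : pvFindBest d (c :: rest) (rest.length + 1) = b at hble ⊢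
    by_cases hpos : 0 < b
    · simp only [if_pos hpos]
      have hdrop : (pvBgo d rest).getD (b - 1) [] = (pvBgo d ((c :: rest).drop b)).getD 0 [] := by
        have : (c :: rest).drop b = rest.drop (b - 1) := by
          cases b with
          | zero => omega
          | succ b => simp
        rw [this]
        exact pvBgo_getD_drop d rest (b - 1) (by omega)
      rw [hdrop]
      by_cases hlt : b < rest.length + 1
      · simp only [if_pos hlt]
        have hne' : (c :: rest).drop b ≠ [] := by
          intro h
          have := congrArg List.length h
          simp at this
          omega
        have hlen' : ((c :: rest).drop b).length ≤ fuel := by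
          simp only [List.length_drop, List.length_cons]
          omega
        rw [ih _ hne' hlen']
      · -- b = length: A yields each a directly; B maps over res_0 = [[]]
        have hbeq : b = rest.length + 1 := by omega
        simp only [if_neg hlt]
        have : (c :: rest).drop b = [] := by
          apply List.drop_eq_nil_of_le
          simp [hbeq]
        rw [this]
        simp [pvBgo]
    · simp only [if_neg hpos]
      have hb0 : b = 0 := by omega
      by_cases hone : rest = []
      · subst hone
        simp [pvBgo]
      · have hlen1 : ¬(rest.length + 1 = 1) := by
          intro h
          exact hone (List.length_eq_zero_iff.mp (by omega))
        rw [if_neg hlen1]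
        simp only [List.drop_succ_cons, List.drop_zero, List.take_succ_cons, List.take_zero]
        rw [ih rest hone (by omega)]
        simp

-- ===== VERDICT (by name: the statement is the Claim_ definition above) =====
theorem longestReplace_spec : Claim_equal_longestReplace := by
  intro s d _ hpre
  unfold Spec_longestReplace longestReplace longestReplace_alt
  have hne : s.toList ≠ [] := by
    intro h
    apply hpre
    have := congrArg String.ofList h
    simpa using this
  rw [pvAgo_eq_bgo d s.toList.length s.toList hne le_rfl]

@[simp]
theorem longestReplace_raises : Claim_raises_longestReplace := by
  unfold Claim_raises_longestReplace
  constructor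
  · intro s d _ hr hpre
    exact hpre hr
  · exact ⟨by decide, by decide, by decide⟩
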